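-- pv_equiv track=rewrite | github.com/BackofenLab/B2_10_intro_mapping | helpers/implementation.py | transformation_b_ranking_correct
-- ===== SOURCE A (Python) =====
-- def transformation_b_ranking_correct(t):
--     """
--         This function takes the string transformation (t) and returns the ranking of the transformation.
--         """
--     dict_occurrences = {}
--     ranks = []
--     for c in t:
--         if c not in dict_occurrences:
--             dict_occurrences[c] = 0
--         ranks.append(dict_occurrences[c])
--         dict_occurrences[c] += 1
--     return ranks
-- ===== SOURCE B (Python) =====
-- def transformation_b_ranking_correct(t):
--     """Rank of each char = number of its earlier occurrences, computed statelessly per index."""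
--     return [t[:i].count(c) for i, c in enumerate(t)]
-- ===== Notes on version B (the rewrite author's own statement) =====
-- stated objective: simpler
-- what changed: Replaces the stateful loop maintaining a per-character occurrence dict with a stateless comprehension that recounts each character in the prefix t[:i] directly.
import Mathlib
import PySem

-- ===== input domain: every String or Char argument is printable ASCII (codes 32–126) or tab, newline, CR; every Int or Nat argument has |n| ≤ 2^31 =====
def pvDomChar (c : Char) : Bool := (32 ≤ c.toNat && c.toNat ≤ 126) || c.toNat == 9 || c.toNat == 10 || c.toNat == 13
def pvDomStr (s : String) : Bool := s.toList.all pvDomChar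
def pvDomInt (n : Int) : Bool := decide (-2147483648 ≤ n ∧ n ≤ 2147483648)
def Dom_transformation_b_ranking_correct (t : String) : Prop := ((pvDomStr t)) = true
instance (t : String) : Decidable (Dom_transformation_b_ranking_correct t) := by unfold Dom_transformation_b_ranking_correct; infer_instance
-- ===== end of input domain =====

-- B replaces A's stateful occurrence-dict loop with a stateless per-index prefix recount (simpler, not faster).


-- ===== PORT A =====
-- loop body: 'if c not in dict_occurrences: dict_occurrences[c] = 0; ranks.append(dict_occurrences[c]); dict_occurrences[c] += 1'
def pvStepA (st : PySem.Dict Char Int × List Int) (c : Char) : PySem.Dict Char Int × List Int :=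
  let d := if st.1.contains c = true then st.1 else st.1.insert c 0
  (d.insert c (d.getD c 0 + 1), st.2 ++ [d.getD c 0])

def transformation_b_ranking_correct (t : String) : List Int :=
  (t.toList.foldl pvStepA (PySem.Dict.empty, [])).2

-- ===== PORT B =====
-- '[t[:i].count(c) for i, c in enumerate(t)]'; str.count of a single char is List.count (exact here)
def transformation_b_ranking_correct_alt (t : String) : List Int :=
  (PySem.List.enumerate t.toList).map
    (fun ic => ((PySem.List.slice t.toList none (some ic.1)).count ic.2 : Int))

-- ===== PRECONDITION & SPEC =====
def Spec_transformation_b_ranking_correct (t : String) (out : List Int) : Prop := out = transformation_b_ranking_correct_alt t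
instance (t : String) (out : List Int) : Decidable (Spec_transformation_b_ranking_correct t out) := by unfold Spec_transformation_b_ranking_correct; infer_instance

-- ===== CLAIM (what is proved, stated in full; the proofs are below) =====
def Claim_equal_transformation_b_ranking_correct : Prop := ∀ (t : String), Dom_transformation_b_ranking_correct t → Spec_transformation_b_ranking_correct t (transformation_b_ranking_correct t)

-- ===== LEMMAS AND PROOFS =====

-- indices produced by enumerate are ≥ the start
lemma enumerate_fst_le {α : Type} (l : List α) (s : Int) :
    ∀ ic ∈ PySem.List.enumerate l s, s ≤ ic.1 := by
  induction l generalizing s with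
  | nil => simp [PySem.List.enumerate_nil]
  | cons x xs ih =>
    intro ic h
    rw [PySem.List.enumerate_cons] at h
    rcases List.mem_cons.mp h with h | h
    · simp [h]
    · have := ih (s + 1) ic h; omega

-- A's loop, generalized over an already-processed prefix p whose counts the dict carries
lemma loopA (l : List Char) : ∀ (p : List Char) (d : PySem.Dict Char Int) (ranks : List Int),
    (∀ c, d.getD c 0 = (p.count c : Int)) →
    (l.foldl pvStepA (d, ranks)).2 =
      ranks ++ (PySem.List.enumerate l (p.length : Int)).map
        (fun ic => (((p ++ l).take ic.1.toNat).count ic.2 : Int)) := by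
  induction l with
  | nil => intro p d ranks _; simp [PySem.List.enumerate_nil]
  | cons c l ih =>
    intro p d ranks hd
    rw [List.foldl_cons]
    have hd' : ∀ c', (if d.contains c = true then d else d.insert c 0).getD c' 0 = (p.count c' : Int) := by
      intro c'
      by_cases h : d.contains c = true
      · rw [if_pos h]; exact hd c'
      · rw [if_neg h, PySem.Dict.getD_insert]
        by_cases he : c' = c
        · subst he
          rw [if_pos rfl]
          have hz : d.getD c' (0 : Int) = 0 := PySem.Dict.getD_of_not_contains d 0 (by simpa using h)
          have := hd c'
          rw [hz] at this
          exact this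
        · rw [if_neg he]; exact hd c'
    have hd'' : ∀ c', ((if d.contains c = true then d else d.insert c 0).insert c
        ((if d.contains c = true then d else d.insert c 0).getD c 0 + 1)).getD c' 0 =
        ((p ++ [c]).count c' : Int) := by
      intro c'
      rw [PySem.Dict.getD_insert]
      by_cases he : c' = c
      · subst he
        rw [if_pos rfl, hd' c']
        simp [List.count_append]
      · rw [if_neg he, hd' c']
        have h0 : List.count c' [c] = 0 := by simp [List.count_eq_zero, he]
        simp [List.count_append, h0]
    have := ih (p ++ [c]) _ (ranks ++ [(if d.contains c = true then d else d.insert c 0).getD c 0]) hd''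
    rw [show pvStepA (d, ranks) c = ((if d.contains c = true then d else d.insert c 0).insert c
        ((if d.contains c = true then d else d.insert c 0).getD c 0 + 1),
        ranks ++ [(if d.contains c = true then d else d.insert c 0).getD c 0]) from rfl]
    rw [this, PySem.List.enumerate_cons, List.map_cons, List.append_assoc]
    congr 1
    rw [List.singleton_append]
    congr 1
    · -- head value
      have : ((p ++ c :: l).take (Int.toNat (p.length : Int))).count c = p.count c := by
        simp
      rw [this, hd' c]
    · -- tail map: re-align prefix and start index
      have h1 : ((p ++ [c]).length : Int) = (p.length : Int) + 1 := by simp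
      have h2 : (p ++ [c]) ++ l = p ++ c :: l := by simp
      rw [h1, h2]

-- ===== VERDICT (by name: the statement is the Claim_ definition above) =====
theorem transformation_b_ranking_correct_spec : Claim_equal_transformation_b_ranking_correct := by
  intro t _
  unfold Spec_transformation_b_ranking_correct transformation_b_ranking_correct transformation_b_ranking_correct_alt
  rw [loopA t.toList [] PySem.Dict.empty [] (by intro c; simp [PySem.Dict.getD_empty])]
  simp only [List.nil_append, Nat.cast_zero, List.length_nil]
  apply List.map_congr_left
  intro ic h
  have h0 : (0 : Int) ≤ ic.1 := enumerate_fst_le t.toList 0 ic (by simpa using h)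
  rw [PySem.List.slice_to _ h0]
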